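-- pv_equiv track=rewrite | github.com/cintia09/multi-agent-framework | skills/codenook-core/skills/builtin/_lib/plugin_manifest_index.py | match_plugins
-- ===== SOURCE A (Python) =====
-- def match_plugins(
--     user_text: str, index: dict[str, list[str]]
-- ) -> list[tuple[str, int]]:
--     """Score plugins by substring keyword hits in ``user_text``.
--
--     Case-insensitive substring match. Returns ``[(name, hits)]`` sorted
--     by hits descending, then plugin name ascending. Plugins with zero
--     hits are omitted.
--     """
--     text = (user_text or "").lower()
--     if not text or not index:
--         return []
--     hits: dict[str, int] = {}
--     for keyword, names in index.items():
--         if not keyword: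
--             continue
--         if keyword in text:
--             for name in names:
--                 hits[name] = hits.get(name, 0) + 1
--     return sorted(hits.items(), key=lambda kv: (-kv[1], kv[0]))
-- ===== SOURCE B (Python) =====
-- def match_plugins(
--     user_text: str, index: dict[str, list[str]]
-- ) -> list[tuple[str, int]]:
--     """Score plugins by substring keyword hits in ``user_text``.
--
--     Flat re-implementation: flatten the name pools of all matched keywords,
--     sort so equal names are adjacent, run-length encode the runs into
--     (name, hits) pairs, then order by hits descending / name ascending.
--     """
--     text = user_text.lower()
--     if not text:
--         return []
--     pool = sorted(n for kw, ns in index.items() if kw and kw in text for n in ns)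
--     items: list[tuple[str, int]] = []
--     for n in pool:
--         if items and items[-1][0] == n:
--             items[-1] = (n, items[-1][1] + 1)
--         else:
--             items.append((n, 1))
--     return sorted(items, key=lambda kv: (-kv[1], kv[0]))
-- ===== Notes on version B (the rewrite author's own statement) =====
-- stated objective: alternative
-- what changed: Replaces the incremental hits-dict updated inside a nested keyword/name loop by a flat pipeline: flatten the name lists of all matched keywords into one pool, sort it, run-length encode the runs into (name, hits) pairs, then sort by (-hits, name); the explicit empty-index early return disappears.
import Mathlib
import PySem

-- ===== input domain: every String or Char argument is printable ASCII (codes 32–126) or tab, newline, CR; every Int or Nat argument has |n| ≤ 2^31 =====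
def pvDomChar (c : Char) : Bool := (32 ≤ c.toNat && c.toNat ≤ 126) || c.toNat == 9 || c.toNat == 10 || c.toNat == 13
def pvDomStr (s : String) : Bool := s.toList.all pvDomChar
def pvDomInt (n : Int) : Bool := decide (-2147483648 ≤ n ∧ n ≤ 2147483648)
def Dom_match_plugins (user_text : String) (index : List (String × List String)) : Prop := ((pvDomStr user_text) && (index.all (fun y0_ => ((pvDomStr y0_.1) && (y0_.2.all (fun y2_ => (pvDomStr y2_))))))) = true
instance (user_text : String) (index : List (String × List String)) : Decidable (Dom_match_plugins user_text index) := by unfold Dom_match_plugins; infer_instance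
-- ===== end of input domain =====

-- B replaces A's incremental hits-dict built in a nested loop by a flat pipeline:
-- flatten matched keywords' name lists, sort, run-length encode, re-sort; alternative, not claimed faster.


-- ===== PORT A =====
def match_plugins (user_text : String) (index : List (String × List String)) : List (String × Int) :=
  -- text = (user_text or "").lower()
  let text := PySem.Str.lower (if user_text = "" then "" else user_text)
  if text = "" ∨ index = [] then []
  else
    let hits : PySem.Dict String Int :=
      index.foldl (fun d kn =>
        if kn.1 = "" then d
        else if PySem.Str.isIn kn.1 text then
          kn.2.foldl (fun d n => d.insert n (d.getD n 0 + 1)) d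
        else d) PySem.Dict.empty
    PySem.List.sorted2 hits.items (fun kv => -kv.2) (fun kv => kv.1) false

-- ===== PORT B =====
-- one step of B's run-length loop: `items[-1] = (n, items[-1][1]+1)` or `items.append((n, 1))`
def runsStep (acc : List (String × Int)) (n : String) : List (String × Int) :=
  match acc.getLast? with
  | some p => if p.1 = n then acc.dropLast ++ [(n, p.2 + 1)] else acc ++ [(n, 1)]
  | none => acc ++ [(n, 1)]

def match_plugins_alt (user_text : String) (index : List (String × List String)) : List (String × Int) :=
  let text := PySem.Str.lower user_text
  if text = "" then []
  else
    let pool := PySem.List.sorted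
      ((index.filter (fun kn => kn.1 ≠ "" && PySem.Str.isIn kn.1 text)).flatMap (·.2))
      (fun n => n) false
    let items := pool.foldl runsStep []
    PySem.List.sorted2 items (fun kv => -kv.2) (fun kv => kv.1) false

-- ===== PRECONDITION & SPEC =====
def Spec_match_plugins (user_text : String) (index : List (String × List String)) (out : List (String × Int)) : Prop := out = match_plugins_alt user_text index
instance (user_text : String) (index : List (String × List String)) (out : List (String × Int)) : Decidable (Spec_match_plugins user_text index out) := by unfold Spec_match_plugins; infer_instance

-- ===== CLAIM (what is proved, stated in full; the proofs are below) =====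
def Claim_equal_match_plugins : Prop := ∀ (user_text : String) (index : List (String × List String)), Dom_match_plugins user_text index → Spec_match_plugins user_text index (match_plugins user_text index)

-- ===== LEMMAS AND PROOFS =====

-- A's nested counting loop equals one insert-counting fold over the flattened pool.
theorem foldl_nested_eq_pool (text : String) (index : List (String × List String))
    (d : PySem.Dict String Int) :
    index.foldl (fun d kn =>
        if kn.1 = "" then d
        else if PySem.Str.isIn kn.1 text then
          kn.2.foldl (fun d n => d.insert n (d.getD n 0 + 1)) d
        else d) d
    = ((index.filter (fun kn => kn.1 ≠ "" && PySem.Str.isIn kn.1 text)).flatMap (·.2)).foldl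
        (fun d n => d.insert n (d.getD n 0 + 1)) d := by
  induction index generalizing d with
  | nil => rfl
  | cons kn rest ih =>
    simp only [List.foldl_cons, List.filter_cons]
    by_cases h1 : kn.1 = ""
    · rw [if_pos h1, ih]
      have hc : (decide (kn.1 ≠ "") && PySem.Str.isIn kn.1 text) = false := by simp [h1]
      rw [hc]; simp
    · rw [if_neg h1]
      by_cases h2 : PySem.Str.isIn kn.1 text = true
      · rw [if_pos h2, ih]
        have hc : (decide (kn.1 ≠ "") && PySem.Str.isIn kn.1 text) = true := by
          rw [decide_eq_true h1, h2, Bool.and_self]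
        rw [hc]
        simp [List.foldl_append]
      · rw [if_neg h2, ih]
        have hc : (decide (kn.1 ≠ "") && PySem.Str.isIn kn.1 text) = false := by
          rw [Bool.not_eq_true] at h2; rw [h2, Bool.and_false]
        rw [hc]; simp

-- ---- B's run-length fold on a sorted pool ----

theorem runsStep_ne_nil (acc : List (String × Int)) (n : String) : runsStep acc n ≠ [] := by
  cases h : acc.getLast? with
  | none => simp [runsStep, h]
  | some p => by_cases hp : p.1 = n <;> simp [runsStep, h, hp]

theorem runsStep_append (acc0 acc : List (String × Int)) (n : String) (h : acc ≠ []) :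
    runsStep (acc0 ++ acc) n = acc0 ++ runsStep acc n := by
  unfold runsStep
  rw [List.getLast?_append]
  cases hg : acc.getLast? with
  | none => exact absurd (List.getLast?_eq_none_iff.mp hg) h
  | some p =>
    simp only [Option.some_or]
    split
    · rw [List.dropLast_append_of_ne_nil h, List.append_assoc]
    · rw [List.append_assoc]

theorem foldl_runsStep_shift (l : List String) (acc0 acc : List (String × Int)) (h : acc ≠ []) :
    l.foldl runsStep (acc0 ++ acc) = acc0 ++ l.foldl runsStep acc := by
  induction l generalizing acc with
  | nil => rfl
  | cons n l ih =>
    simp only [List.foldl_cons]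
    rw [runsStep_append _ _ _ h, ih _ (runsStep_ne_nil acc n)]

theorem foldl_runsStep_run (a : String) : ∀ (t1 : List String), (∀ x ∈ t1, x = a) → ∀ (c : Int),
    t1.foldl runsStep [(a, c)] = [(a, c + t1.length)] := by
  intro t1
  induction t1 with
  | nil => intro _ c; simp
  | cons x t ih =>
    intro hx c
    have hxa : x = a := hx x (by simp)
    subst hxa
    have hstep : runsStep [(x, c)] x = [(x, c + 1)] := by simp [runsStep]
    simp only [List.foldl_cons, hstep]
    rw [ih (fun y hy => hx y (by simp [hy])) (c + 1)]
    have : c + 1 + (t.length : Int) = c + ((t.length + 1 : Nat) : Int) := by push_cast; ring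
    simp [this]

theorem foldl_runsStep_start (p : String × Int) (t2 : List String)
    (h : ∀ x, t2.head? = some x → x ≠ p.1) :
    t2.foldl runsStep [p] = p :: t2.foldl runsStep [] := by
  cases t2 with
  | nil => rfl
  | cons h2 t2' =>
    have hne : h2 ≠ p.1 := h h2 rfl
    have e1 : runsStep [p] h2 = [p, (h2, 1)] := by
      have hne' : ¬ p.1 = h2 := fun hh => hne hh.symm
      simp [runsStep, hne']
    have e2 : runsStep [] h2 = [(h2, 1)] := by simp [runsStep]
    simp only [List.foldl_cons, e1, e2]
    exact foldl_runsStep_shift t2' [p] [(h2, 1)] (by simp)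

-- characterisation of the run-length fold on a sorted list
theorem runs_spec : ∀ (N : Nat) (l : List String), l.length ≤ N → l.Pairwise (· ≤ ·) →
    ((l.foldl runsStep []).map Prod.fst).Nodup ∧
      (∀ p : String × Int, p ∈ l.foldl runsStep [] ↔ (p.1 ∈ l ∧ p.2 = (l.count p.1 : Int))) := by
  intro N
  induction N with
  | zero =>
    intro l hl _
    have hnil : l = [] := List.length_eq_zero_iff.mp (Nat.le_zero.mp hl)
    subst hnil; simp
  | succ N ih =>
    intro l hl hs
    match l with
    | [] => simp
    | a :: t =>
      have hsplit : t.takeWhile (fun x => x == a) ++ t.dropWhile (fun x => x == a) = t :=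
        List.takeWhile_append_dropWhile
      set t1 := t.takeWhile (fun x => x == a) with ht1
      set t2 := t.dropWhile (fun x => x == a) with ht2
      obtain ⟨ha, htp⟩ := List.pairwise_cons.mp hs
      have ht1a : ∀ x ∈ t1, x = a := by
        intro x hx
        have := List.mem_takeWhile_imp hx
        simpa using this
      -- every element of t2 is > a
      have hat2 : ∀ n ∈ t2, a < n := by
        have hsub : t2.Sublist t := ht2 ▸ List.dropWhile_sublist _
        have hp2 : t2.Pairwise (· ≤ ·) := htp.sublist hsub
        intro n hn
        have hle : a ≤ n := ha n (hsub.mem hn)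
        cases hh : t2 with
        | nil => simp [hh] at hn
        | cons h2 t2' =>
          have hhd : (h2 == a) = false := by
            have := List.head?_dropWhile_not (fun x => x == a) t
            rw [← ht2, hh] at this
            simpa using this
          have hha : h2 ≠ a := by simpa using hhd
          have hah2 : a < h2 := lt_of_le_of_ne (ha h2 (hsub.mem (hh ▸ List.mem_cons_self))) (Ne.symm hha)
          rw [hh] at hn
          rcases List.mem_cons.mp hn with rfl | hn'
          · exact hah2
          · have : h2 ≤ n := by
              rw [hh] at hp2
              exact (List.pairwise_cons.mp hp2).1 n hn'
            exact lt_of_lt_of_le hah2 this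
      have hant2 : a ∉ t2 := fun hmem => lt_irrefl a (hat2 a hmem)
      -- the fold peels off the first run
      have hfold : (a :: t).foldl runsStep [] = (a, (1 : Int) + t1.length) :: t2.foldl runsStep [] := by
        have h0 : runsStep [] a = [(a, 1)] := by simp [runsStep]
        calc (a :: t).foldl runsStep []
            = t.foldl runsStep [(a, 1)] := by rw [List.foldl_cons, h0]
          _ = (t1 ++ t2).foldl runsStep [(a, 1)] := by rw [hsplit]
          _ = t2.foldl runsStep [(a, (1 : Int) + t1.length)] := by
              rw [List.foldl_append, foldl_runsStep_run a t1 ht1a 1]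
          _ = (a, (1 : Int) + t1.length) :: t2.foldl runsStep [] := by
              refine foldl_runsStep_start _ _ ?_
              intro x hx hxa
              exact absurd (hat2 x (List.mem_of_mem_head? hx)) (by simp [hxa])
      have hlen : t2.length ≤ N := by
        have h1 : t2.length ≤ t.length := List.Sublist.length_le (ht2 ▸ List.dropWhile_sublist _)
        simp at hl; omega
      have hp2 : t2.Pairwise (· ≤ ·) := htp.sublist (ht2 ▸ List.dropWhile_sublist _)
      obtain ⟨ihn, ihm⟩ := ih t2 hlen hp2
      -- counts
      have hcount_a : ((a :: t).count a : Int) = 1 + t1.length := by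
        rw [← hsplit]
        have hc1 : t1.count a = t1.length := List.count_eq_length.mpr (fun b hb => (ht1a b hb).symm)
        have hc2 : t2.count a = 0 := List.count_eq_zero.mpr hant2
        simp [List.count_append, hc1, hc2]
        ring
      have hcount_t2 : ∀ n, n ∈ t2 → ((a :: t).count n : Int) = t2.count n := by
        intro n hn
        have hna : a ≠ n := fun h => hant2 (h ▸ hn)
        have hc1 : t1.count n = 0 := List.count_eq_zero.mpr (fun hmem => hna ((ht1a n hmem).symm))
        rw [← hsplit]
        simp [List.count_append, hc1, hna]
      constructor
      · rw [hfold]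
        simp only [List.map_cons, List.nodup_cons]
        refine ⟨?_, ihn⟩
        intro hmem
        rw [List.mem_map] at hmem
        obtain ⟨p, hp, hpa⟩ := hmem
        have := ((ihm p).mp hp).1
        rw [hpa] at this
        exact hant2 this
      · intro p
        rw [hfold, List.mem_cons, ihm p]
        constructor
        · rintro (rfl | ⟨hp1, hp2c⟩)
          · exact ⟨by simp, by simpa using hcount_a.symm⟩
          · refine ⟨?_, ?_⟩
            · have : p.1 ∈ t := (ht2 ▸ List.dropWhile_sublist _ : t2.Sublist t).mem hp1
              simp [this]
            · rw [hp2c, hcount_t2 p.1 hp1]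
        · rintro ⟨hp1, hp2c⟩
          by_cases hpa : p.1 = a
          · left
            have : p.2 = (1 : Int) + t1.length := by rw [hp2c, hpa]; exact_mod_cast hcount_a
            calc p = (p.1, p.2) := rfl
              _ = (a, (1 : Int) + t1.length) := by rw [hpa, this]
          · right
            have hp1' : p.1 ∈ t := by
              rcases List.mem_cons.mp hp1 with h | h
              · exact absurd h hpa
              · exact h
            have hpt2 : p.1 ∈ t2 := by
              rw [← hsplit] at hp1'
              rcases List.mem_append.mp hp1' with h | h
              · exact absurd (ht1a _ h) hpa
              · exact h
            exact ⟨hpt2, by rw [hp2c, hcount_t2 p.1 hpt2]⟩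

-- ---- uniqueness of the final (-hits, name) sort ----

def LexLe (a b : String × Int) : Prop := -a.2 < -b.2 ∨ (-a.2 = -b.2 ∧ a.1 ≤ b.1)

def lexBef (a b : String × Int) : Bool :=
  decide (-a.2 < -b.2) || (!decide (-b.2 < -a.2) && decide (a.1 < b.1))

theorem sorted2_eq_foldl (xs : List (String × Int)) :
    PySem.List.sorted2 xs (fun kv => -kv.2) (fun kv => kv.1) false
      = xs.foldl (fun acc x => PySem.List.insertBy lexBef x acc) [] := rfl

theorem lexBef_true (a b : String × Int) (h : lexBef a b = true) : LexLe a b := by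
  unfold lexBef at h; unfold LexLe
  simp only [Bool.or_eq_true, Bool.and_eq_true, Bool.not_eq_true', decide_eq_true_eq,
    decide_eq_false_iff_not] at h
  rcases h with h1 | ⟨h2a, h2b⟩
  · exact Or.inl h1
  · rcases lt_or_eq_of_le (not_lt.mp h2a) with hlt | heq
    · exact Or.inl hlt
    · exact Or.inr ⟨heq, le_of_lt h2b⟩

theorem lexBef_false (a b : String × Int) (h : lexBef a b = false) : LexLe b a := by
  unfold LexLe
  by_cases hba : -b.2 < -a.2
  · exact Or.inl hba
  · have h1 : ¬ (-a.2 < -b.2) := by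
      intro hab; simp [lexBef, hab] at h
    have h2 : ¬ (a.1 < b.1) := by
      intro hab; simp [lexBef, hab, hba] at h
    exact Or.inr ⟨le_antisymm (not_lt.mp h1) (not_lt.mp hba), not_lt.mp h2⟩

theorem LexLe_trans {a b c : String × Int} (h1 : LexLe a b) (h2 : LexLe b c) : LexLe a c := by
  unfold LexLe at *
  rcases h1 with h1 | ⟨h1e, h1s⟩ <;> rcases h2 with h2 | ⟨h2e, h2s⟩
  · exact Or.inl (h1.trans h2)
  · exact Or.inl (h2e ▸ h1)
  · exact Or.inl (h1e ▸ h2)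
  · exact Or.inr ⟨h1e.trans h2e, h1s.trans h2s⟩

theorem insertBy_lex_pairwise (x : String × Int) (ys : List (String × Int))
    (h : ys.Pairwise LexLe) : (PySem.List.insertBy lexBef x ys).Pairwise LexLe := by
  induction ys with
  | nil => simp [PySem.List.insertBy]
  | cons y ys ih =>
    rw [PySem.List.insertBy.eq_def]
    obtain ⟨hy, hys⟩ := List.pairwise_cons.mp h
    by_cases hb : lexBef x y = true
    · simp only [hb, if_true]
      refine List.pairwise_cons.mpr ⟨?_, h⟩
      intro z hz
      rcases List.mem_cons.mp hz with rfl | hz'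
      · exact lexBef_true x z hb
      · exact LexLe_trans (lexBef_true x y hb) (hy z hz')
    · rw [Bool.not_eq_true] at hb
      simp only [hb]
      refine List.pairwise_cons.mpr ⟨?_, ih hys⟩
      intro z hz
      rcases (PySem.List.mem_insertBy lexBef x z ys).mp hz with hzx | hz'
      · rw [hzx]; exact lexBef_false x y hb
      · exact hy z hz'

theorem foldl_insertBy_lex_pairwise (xs : List (String × Int)) :
    ∀ (acc : List (String × Int)), acc.Pairwise LexLe →
      (xs.foldl (fun acc x => PySem.List.insertBy lexBef x acc) acc).Pairwise LexLe := by
  induction xs with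
  | nil => intro acc h; exact h
  | cons x xs ih =>
    intro acc h
    exact ih _ (insertBy_lex_pairwise x acc h)

theorem sorted2_lex_eq_of_perm (xs ys : List (String × Int)) (h : xs.Perm ys) :
    PySem.List.sorted2 xs (fun kv => -kv.2) (fun kv => kv.1) false
      = PySem.List.sorted2 ys (fun kv => -kv.2) (fun kv => kv.1) false := by
  apply List.Perm.eq_of_pairwise (le := LexLe)
  · intro a b _ _ hab hba
    unfold LexLe at hab hba
    have h2 : a.2 = b.2 := by omega
    have h1 : a.1 = b.1 := by
      rcases hab with hab | ⟨_, hab⟩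
      · omega
      · rcases hba with hba | ⟨_, hba⟩
        · omega
        · exact le_antisymm hab hba
    exact Prod.ext h1 h2
  · rw [sorted2_eq_foldl]; exact foldl_insertBy_lex_pairwise xs [] (List.Pairwise.nil)
  · rw [sorted2_eq_foldl]; exact foldl_insertBy_lex_pairwise ys [] (List.Pairwise.nil)
  · exact ((PySem.List.sorted2_perm xs _ _ false).trans h).trans
      (PySem.List.sorted2_perm ys _ _ false).symm

-- ---- the two pre-sort item lists are permutations of each other ----

theorem items_perm (pool : List String) :
    ((PySem.Set.ofList pool).map (fun n => (n, (pool.count n : Int)))).Perm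
      ((PySem.List.sorted pool (fun n => n) false).foldl runsStep []) := by
  have hperm : (PySem.List.sorted pool (fun n => n) false).Perm pool :=
    PySem.List.sorted_perm pool (fun n => n) false
  have hs : (PySem.List.sorted pool (fun n => n) false).Pairwise (· ≤ ·) :=
    PySem.List.sorted_pairwise pool (fun n => n)
  obtain ⟨hnd, hmem⟩ := runs_spec (PySem.List.sorted pool (fun n => n) false).length _ le_rfl hs
  have hndA : ((PySem.Set.ofList pool).map (fun n => (n, (pool.count n : Int)))).Nodup :=
    (PySem.Set.nodup_ofList pool).map (fun a b hab => congrArg Prod.fst hab)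
  have hndB : ((PySem.List.sorted pool (fun n => n) false).foldl runsStep []).Nodup :=
    List.Nodup.of_map _ hnd
  refine (List.perm_ext_iff_of_nodup hndA hndB).mpr ?_
  rintro ⟨p1, p2⟩
  rw [hmem (p1, p2), List.mem_map]
  constructor
  · rintro ⟨n, hn, heq⟩
    rw [Prod.mk.injEq] at heq
    obtain ⟨he1, he2⟩ := heq
    refine ⟨?_, ?_⟩
    · show p1 ∈ _
      rw [← he1]
      exact hperm.mem_iff.mpr ((PySem.Set.mem_ofList pool n).mp hn)
    · show p2 = _
      rw [← he2, ← he1, hperm.count_eq]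
  · rintro ⟨hp1, hp2⟩
    refine ⟨p1, (PySem.Set.mem_ofList pool p1).mpr (hperm.mem_iff.mp hp1), ?_⟩
    rw [Prod.mk.injEq]
    exact ⟨rfl, by rw [hperm.count_eq] at hp2; exact hp2.symm⟩

theorem match_plugins_eq (user_text : String) (index : List (String × List String)) :
    match_plugins user_text index = match_plugins_alt user_text index := by
  unfold match_plugins match_plugins_alt
  have htext : PySem.Str.lower (if user_text = "" then "" else user_text)
      = PySem.Str.lower user_text := by
    by_cases h : user_text = "" <;> simp [h]
  rw [htext]
  by_cases ht : PySem.Str.lower user_text = ""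
  · simp [ht]
  · by_cases hi : index = []
    · subst hi
      simp [ht, PySem.List.sorted2, PySem.List.sorted]
    · simp only [ht, hi, or_self, if_false]
      rw [foldl_nested_eq_pool, PySem.Dict.foldl_insert_getD_add_one_eq_counter,
        PySem.Dict.items_counter]
      exact sorted2_lex_eq_of_perm _ _ (items_perm _)

-- ===== VERDICT (by name: the statement is the Claim_ definition above) =====
theorem match_plugins_spec : Claim_equal_match_plugins := by
  intro user_text index _
  unfold Spec_match_plugins
  exact match_plugins_eq user_text index
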